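-- pv_equiv track=rewrite | github.com/qn06142/coding-python | chordsbrute.py | brute_force_arcs
-- ===== SOURCE A (Python) =====
-- from itertools import combinations
--
-- def is_intersect(arc1, arc2):
--     a1, b1 = arc1
--     a2, b2 = arc2
--     # Điều kiện cắt nhau: Một dây cung nằm giữa hai đầu mút của dây cung kia
--     return (a1 < a2 < b1 < b2) or (a2 < a1 < b2 < b1)
--
-- def brute_force_arcs(n, arcs):
--     max_count = 0
--
--     # Duyệt qua tất cả các tập con của các dây cung
--     for r in range(1, n + 1):
--         for subset in combinations(arcs, r):
--             # Kiểm tra xem tập con này có dây cung nào cắt nhau không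
--             is_valid = True
--             for i in range(len(subset)):
--                 for j in range(i + 1, len(subset)):
--                     if is_intersect(subset[i], subset[j]):
--                         is_valid = False
--                         break
--                 if not is_valid:
--                     break
--             # Nếu tập con hợp lệ, cập nhật số lượng dây cung
--             if is_valid:
--                 max_count = max(max_count, len(subset))
--
--     return max_count
-- ===== SOURCE B (Python) =====
-- def is_intersect(arc1, arc2):
--     a1, b1 = arc1
--     a2, b2 = arc2
--     return (a1 < a2 < b1 < b2) or (a2 < a1 < b2 < b1)
--
-- def brute_force_arcs(n, arcs):
--     # Branch-and-prune recursion: max mutually non-crossing subset, capped at n.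
--     def mis(lst):
--         if not lst:
--             return 0
--         x = lst[0]
--         rest = lst[1:]
--         keep = [y for y in rest if not is_intersect(x, y)]
--         if len(keep) == len(rest):
--             # x crosses nothing later: always take it
--             return 1 + mis(rest)
--         return max(mis(rest), 1 + mis(keep))
--     return max(0, min(n, mis(arcs)))
-- ===== Notes on version B (the rewrite author's own statement) =====
-- stated objective: faster
-- what changed: A enumerates every subset of the arcs (for sizes 1..n) and tests each pair inside each subset; B computes the maximum non-crossing count once with a skip-or-take branch-and-prune recursion on the arc list (recursing on the remainder compatible with the taken arc, and taking an arc unconditionally when it crosses nothing later), then caps the result at n.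
import Mathlib
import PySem

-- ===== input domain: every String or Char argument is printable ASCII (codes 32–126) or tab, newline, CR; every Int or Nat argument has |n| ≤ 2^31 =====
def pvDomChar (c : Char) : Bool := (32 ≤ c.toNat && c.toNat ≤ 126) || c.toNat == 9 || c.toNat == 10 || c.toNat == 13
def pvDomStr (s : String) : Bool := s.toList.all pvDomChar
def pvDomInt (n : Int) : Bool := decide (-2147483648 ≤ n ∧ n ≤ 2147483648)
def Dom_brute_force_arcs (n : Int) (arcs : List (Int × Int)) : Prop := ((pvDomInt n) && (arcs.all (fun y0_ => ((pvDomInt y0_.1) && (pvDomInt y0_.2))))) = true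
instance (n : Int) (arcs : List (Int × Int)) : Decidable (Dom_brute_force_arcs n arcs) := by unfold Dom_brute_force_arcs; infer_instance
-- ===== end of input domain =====

-- B replaces A's enumeration of every subset of the arcs by a branch-and-prune
-- recursion (skip/take the first arc, recursing on the compatible remainder), capped at n.

-- ===== PORT A =====
def is_intersect (arc1 arc2 : Int × Int) : Bool :=
  (decide (arc1.1 < arc2.1) && decide (arc2.1 < arc1.2) && decide (arc1.2 < arc2.2)) ||
  (decide (arc2.1 < arc1.1) && decide (arc1.1 < arc2.2) && decide (arc2.2 < arc1.2))

-- itertools.combinations(l, r), ported by hand: exact same lists in the exact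
-- lexicographic-by-index order Python yields them.
def comb {α : Type} : List α → Nat → List (List α)
  | _, 0 => [[]]
  | [], _ + 1 => []
  | x :: xs, r + 1 => (comb xs r).map (x :: ·) ++ comb xs (r + 1)

-- A's nested i/j validity loops with their break flag: the breaks only
-- short-circuit, so is_valid = "no later element crosses an earlier one";
-- List.any short-circuits the same way (value-exact).
def anyCross : List (Int × Int) → Bool
  | [] => false
  | x :: xs => xs.any (fun y => is_intersect x y) || anyCross xs

def brute_force_arcs (n : Int) (arcs : List (Int × Int)) : Int :=
  (PySem.List.pyRange 1 (n + 1) 1).foldl (fun max_count r =>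
    -- r ranges over 1..n, so r ≥ 1 and r.toNat is exact
    (comb arcs r.toNat).foldl (fun mc subset =>
      if anyCross subset = false then max mc (subset.length : Int) else mc) max_count) 0

-- ===== PORT B =====
-- mis lst = size of the largest mutually non-crossing sublist of lst
def misAlt : List (Int × Int) → Int
  | [] => 0
  | x :: rest =>
    if (rest.filter (fun y => !is_intersect x y)).length = rest.length then
      1 + misAlt rest
    else
      max (misAlt rest) (1 + misAlt (rest.filter (fun y => !is_intersect x y)))
termination_by l => l.length
decreasing_by
  all_goals simp
  have := List.length_filter_le (fun x_1 : {y // y ∈ rest} => !is_intersect x x_1.1) rest.attach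
  simp at this
  omega

def brute_force_arcs_alt (n : Int) (arcs : List (Int × Int)) : Int :=
  max 0 (min n (misAlt arcs))

-- ===== PRECONDITION & SPEC =====
def Spec_brute_force_arcs (n : Int) (arcs : List (Int × Int)) (out : Int) : Prop := out = brute_force_arcs_alt n arcs
instance (n : Int) (arcs : List (Int × Int)) (out : Int) : Decidable (Spec_brute_force_arcs n arcs out) := by unfold Spec_brute_force_arcs; infer_instance

-- ===== CLAIM (what is proved, stated in full; the proofs are below) =====
def Claim_equal_brute_force_arcs : Prop := ∀ (n : Int) (arcs : List (Int × Int)), Dom_brute_force_arcs n arcs → Spec_brute_force_arcs n arcs (brute_force_arcs n arcs)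

-- ===== LEMMAS AND PROOFS =====

-- the two branches of misAlt compute one formula
theorem misAlt_cons (x : Int × Int) (rest : List (Int × Int)) :
    misAlt (x :: rest)
      = max (misAlt rest) (1 + misAlt (rest.filter (fun y => !is_intersect x y))) := by
  rw [misAlt]
  split
  · rename_i h
    rw [List.filter_eq_self.mpr (List.length_filter_eq_length_iff.mp h)]
    omega
  · rfl

theorem misAlt_nonneg : ∀ (l : List (Int × Int)), 0 ≤ misAlt l
  | [] => by simp [misAlt]
  | _ :: rest => by
    rw [misAlt_cons]
    have := misAlt_nonneg rest
    omega
termination_by l => l.length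

theorem anyCross_iff (l : List (Int × Int)) :
    anyCross l = false ↔ l.Pairwise (fun a b => is_intersect a b = false) := by
  induction l with
  | nil => simp [anyCross]
  | cons x xs ih =>
    simp [anyCross, List.pairwise_cons, ih]

theorem anyCross_sublist {s t : List (Int × Int)} (h : s.Sublist t)
    (ht : anyCross t = false) : anyCross s = false := by
  rw [anyCross_iff] at *
  exact ht.sublist h

theorem mem_comb {α : Type} : ∀ (l : List α) (r : Nat) (s : List α),
    s ∈ comb l r ↔ s.Sublist l ∧ s.length = r := by
  intro l
  induction l with
  | nil =>
    intro r s
    cases r with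
    | zero => simp [comb, List.sublist_nil, List.length_eq_zero_iff]
    | succ r =>
      simp only [comb, List.not_mem_nil, false_iff]
      rintro ⟨hs, hl⟩
      rw [List.sublist_nil] at hs
      simp [hs] at hl
  | cons x xs ih =>
    intro r s
    cases r with
    | zero =>
      simp only [comb, List.mem_singleton]
      constructor
      · rintro rfl; exact ⟨List.nil_sublist _, rfl⟩
      · rintro ⟨_, hl⟩; exact List.length_eq_zero_iff.mp hl
    | succ r =>
      simp only [comb, List.mem_append, List.mem_map, ih]
      constructor
      · rintro (⟨t, ⟨hsub, hlen⟩, rfl⟩ | ⟨hsub, hlen⟩)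
        · exact ⟨List.cons_sublist_cons.mpr hsub, by simp [hlen]⟩
        · exact ⟨hsub.trans (List.sublist_cons_self x xs), hlen⟩
      · rintro ⟨hsub, hlen⟩
        rcases List.sublist_cons_iff.mp hsub with h | ⟨t, rfl, ht⟩
        · exact Or.inr ⟨h, hlen⟩
        · exact Or.inl ⟨t, ⟨ht, by simpa using hlen⟩, rfl⟩

-- upper bound: any non-crossing sublist of l has size ≤ misAlt l
theorem le_misAlt : ∀ (l s : List (Int × Int)), s.Sublist l → anyCross s = false →
    (s.length : Int) ≤ misAlt l
  | [], s, hs, _ => by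
    rw [List.sublist_nil] at hs
    simp [hs, misAlt]
  | x :: rest, s, hs, hc => by
    rw [misAlt_cons]
    rcases List.sublist_cons_iff.mp hs with h' | ⟨t, rfl, ht⟩
    · have := le_misAlt rest s h' hc
      omega
    · simp only [anyCross, Bool.or_eq_false_iff, List.any_eq_false] at hc
      have htf : t.filter (fun y => !is_intersect x y) = t :=
        List.filter_eq_self.mpr (by intro a ha; simp [hc.1 a ha])
      have hsf : (t.filter (fun y => !is_intersect x y)).Sublist
          (rest.filter (fun y => !is_intersect x y)) := ht.filter _
      rw [htf] at hsf
      have := le_misAlt (rest.filter (fun y => !is_intersect x y)) t hsf hc.2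
      have hle := List.length_filter_le (fun y => !is_intersect x y) rest
      simp only [List.length_cons]
      omega
termination_by l => l.length
decreasing_by
  · simp
  · have := List.length_filter_le (fun y => !is_intersect x y) rest
    simp
    omega

-- the bound is attained
theorem misAlt_attained : ∀ (l : List (Int × Int)),
    ∃ s, s.Sublist l ∧ anyCross s = false ∧ (s.length : Int) = misAlt l
  | [] => ⟨[], by simp [anyCross, misAlt]⟩
  | x :: rest => by
    obtain ⟨s1, h1, c1, l1⟩ := misAlt_attained rest
    obtain ⟨s2, h2, c2, l2⟩ := misAlt_attained (rest.filter (fun y => !is_intersect x y))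
    by_cases hcmp : 1 + misAlt (rest.filter (fun y => !is_intersect x y)) ≤ misAlt rest
    · exact ⟨s1, h1.trans (List.sublist_cons_self x rest), c1, by rw [misAlt_cons]; omega⟩
    · refine ⟨x :: s2, List.cons_sublist_cons.mpr (h2.trans List.filter_sublist), ?_, ?_⟩
      · have hx : ∀ y ∈ s2, is_intersect x y = false := by
          intro y hy
          have := (List.mem_filter.mp (h2.subset hy)).2
          simpa using this
        have hany : s2.any (fun y => is_intersect x y) = false :=
          List.any_eq_false.mpr (by intro y hy; simp [hx y hy])
        simp [anyCross, hany, c2]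
      · rw [misAlt_cons]
        simp only [List.length_cons]
        omega
termination_by l => l.length
decreasing_by
  · simp
  · have := List.length_filter_le (fun y => !is_intersect x y) rest
    simp
    omega

-- existence of a non-crossing sublist of each smaller size
theorem exists_iff (arcs : List (Int × Int)) (k : Nat) :
    (∃ s, s.Sublist arcs ∧ anyCross s = false ∧ s.length = k) ↔ (k : Int) ≤ misAlt arcs := by
  constructor
  · rintro ⟨s, hsub, hc, rfl⟩
    exact le_misAlt arcs s hsub hc
  · intro hk
    obtain ⟨w, hw, hcw, hlw⟩ := misAlt_attained arcs
    refine ⟨w.take k, (List.take_sublist k w).trans hw,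
      anyCross_sublist (List.take_sublist k w) hcw, ?_⟩
    simp only [List.length_take]
    omega

theorem inner_fold (L : List (List (Int × Int))) (r : Int)
    (h : ∀ s ∈ L, (s.length : Int) = r) : ∀ (mc : Int),
    L.foldl (fun mc subset =>
      if anyCross subset = false then max mc (subset.length : Int) else mc) mc
    = if L.any (fun s => !anyCross s) = true then max mc r else mc := by
  induction L with
  | nil => intro mc; simp
  | cons s L ih =>
    intro mc
    have hs : (s.length : Int) = r := h s (by simp)
    have hL : ∀ t ∈ L, (t.length : Int) = r := fun t ht => h t (by simp [ht])
    simp only [List.foldl_cons, List.any_cons]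
    by_cases hc : anyCross s = false
    · rw [if_pos hc, hs, ih hL]
      have ht : (!anyCross s || L.any fun s => !anyCross s) = true := by simp [hc]
      rw [if_pos ht]
      split <;> omega
    · rw [if_neg hc]
      have hc' : anyCross s = true := by revert hc; cases anyCross s <;> simp
      rw [ih hL]
      simp [hc']

theorem outer_fold (arcs : List (Int × Int)) : ∀ (b : Int), 0 ≤ b →
    (PySem.List.pyRange 1 (b + 1) 1).foldl (fun max_count r =>
      (comb arcs r.toNat).foldl (fun mc subset =>
        if anyCross subset = false then max mc (subset.length : Int) else mc) max_count) 0
    = max 0 (min b (misAlt arcs)) := by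
  intro b hb
  induction b, hb using Int.le_induction with
  | base =>
    rw [PySem.List.pyRange_one_eq_nil (by omega)]
    have := misAlt_nonneg arcs
    simp only [List.foldl_nil]
    omega
  | succ b hb ih =>
    rw [PySem.List.pyRange_one_succ_right (by omega : (1:Int) ≤ b + 1),
      List.foldl_append, ih]
    simp only [List.foldl_cons, List.foldl_nil]
    have hlen : ∀ s ∈ comb arcs (b + 1).toNat, (s.length : Int) = b + 1 := by
      intro s hs
      have := ((mem_comb arcs _ s).mp hs).2
      omega
    rw [inner_fold _ _ hlen]
    have hiff : (comb arcs (b + 1).toNat).any (fun s => !anyCross s) = true ↔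
        (b + 1 : Int) ≤ misAlt arcs := by
      rw [List.any_eq_true]
      constructor
      · rintro ⟨s, hs, hcs⟩
        have hm := (mem_comb arcs _ s).mp hs
        have := le_misAlt arcs s hm.1 (by simpa using hcs)
        omega
      · intro hle
        obtain ⟨s, hsub, hc, hlen'⟩ := (exists_iff arcs (b + 1).toNat).mpr (by omega)
        exact ⟨s, (mem_comb arcs _ s).mpr ⟨hsub, hlen'⟩, by simp [hc]⟩
    split
    · rename_i hany
      have := hiff.mp hany
      omega
    · rename_i hany
      have : ¬ ((b + 1 : Int) ≤ misAlt arcs) := fun hle => hany (hiff.mpr hle)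
      omega

-- ===== VERDICT (by name: the statement is the Claim_ definition above) =====
theorem brute_force_arcs_spec : Claim_equal_brute_force_arcs := by
  intro n arcs _
  unfold Spec_brute_force_arcs brute_force_arcs brute_force_arcs_alt
  by_cases hn : 0 ≤ n
  · exact outer_fold arcs n hn
  · rw [PySem.List.pyRange_one_eq_nil (by omega)]
    have := misAlt_nonneg arcs
    simp only [List.foldl_nil]
    omega
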